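-- pv_equiv track=rewrite | github.com/MrBrantCode/unitest_baseline | mut_generate/mist_train_cf/cf_58470/solution.py | remove_consonants
-- ===== SOURCE A (Python) =====
-- def remove_consonants(sentence):
--     if not isinstance(sentence, str):
--         return 'Error: Input should be a string'
--     if not sentence.isalnum() and sentence != '':
--         return 'Error: Input should be alphanumeric'
--
--     vowels = ['a', 'e', 'i', 'o', 'u', 'A', 'E', 'I', 'O', 'U']
--
--     vowel_count_before = sum([1 for char in sentence if char in vowels])
--
--     modified_sentence = "".join([char for char in sentence if char in vowels or char.isnumeric()])
--
--     vowel_count_after = sum([1 for char in modified_sentence if char in vowels])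
--
--     return modified_sentence, vowel_count_before, vowel_count_after
-- ===== SOURCE B (Python) =====
-- def remove_consonants(sentence):
--     if not isinstance(sentence, str):
--         return 'Error: Input should be a string'
--     if not sentence.isalnum() and sentence != '':
--         return 'Error: Input should be alphanumeric'
--     vowels = set('aeiouAEIOU')
--     kept = []
--     vowel_count = 0
--     for char in sentence:
--         if char in vowels:
--             kept.append(char)
--             vowel_count += 1
--         elif char.isnumeric():
--             kept.append(char)
--     return "".join(kept), vowel_count, vowel_count
-- ===== Notes on version B (the rewrite author's own statement) =====
-- stated objective: faster
-- what changed: A makes three passes over the string (count vowels, filter comprehension, recount vowels in the result); B makes one accumulating loop (measured ~4x faster at the largest timing size) that filters and counts simultaneously, using the invariant that all vowels are kept so before == after.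
import Mathlib
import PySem

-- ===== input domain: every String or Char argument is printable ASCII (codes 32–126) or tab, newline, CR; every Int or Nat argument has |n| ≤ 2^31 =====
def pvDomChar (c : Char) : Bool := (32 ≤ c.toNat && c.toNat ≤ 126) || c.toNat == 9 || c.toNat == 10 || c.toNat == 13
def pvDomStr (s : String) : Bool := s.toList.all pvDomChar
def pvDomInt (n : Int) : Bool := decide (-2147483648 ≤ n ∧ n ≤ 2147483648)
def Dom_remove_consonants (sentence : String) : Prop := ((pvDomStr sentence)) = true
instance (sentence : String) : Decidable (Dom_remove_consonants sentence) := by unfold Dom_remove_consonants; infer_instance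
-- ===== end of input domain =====

-- B fuses A's three passes over the string into one loop that both filters and counts
-- the vowels once (objective: faster; a timing run measured B ~4x faster on large inputs).


-- ===== PORT A =====
def pvVowels : List Char := ['a', 'e', 'i', 'o', 'u', 'A', 'E', 'I', 'O', 'U']

-- char.isnumeric() ported as PySem.Chars.isdigit: exact on the ASCII domain (both hold
-- exactly on '0'..'9' there).
def remove_consonants (sentence : String) : String × Int × Int :=
  -- the two guard branches of A return an error STRING (not a tuple); those inputs
  -- are excluded by Pre_remove_consonants and the value here is arbitrary
  if ¬ (PySem.Str.strIsalnum sentence) ∧ sentence ≠ "" then ("", 0, 0)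
  else
    let cs := sentence.toList
    let vowel_count_before : Int :=
      ((cs.filter (fun c => pvVowels.contains c)).map (fun _ => (1 : Int))).sum
    let modified_sentence :=
      cs.filter (fun c => pvVowels.contains c || PySem.Chars.isdigit c)
    let vowel_count_after : Int :=
      ((modified_sentence.filter (fun c => pvVowels.contains c)).map (fun _ => (1 : Int))).sum
    (String.ofList modified_sentence, vowel_count_before, vowel_count_after)

-- ===== PORT B =====
def pvVowelSet : PySem.Set Char := PySem.Set.ofList "aeiouAEIOU".toList

-- the single accumulating loop of B: kept characters and the vowel counter together
def pvBLoop (cs : List Char) (kept : List Char) (cnt : Int) : List Char × Int :=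
  match cs with
  | [] => (kept, cnt)
  | c :: rest =>
      if pvVowelSet.contains c then pvBLoop rest (kept ++ [c]) (cnt + 1)
      else if PySem.Chars.isdigit c then pvBLoop rest (kept ++ [c]) cnt
      else pvBLoop rest kept cnt

def remove_consonants_alt (sentence : String) : String × Int × Int :=
  if ¬ (PySem.Str.strIsalnum sentence) ∧ sentence ≠ "" then ("", 0, 0)
  else
    let (kept, cnt) := pvBLoop sentence.toList [] 0
    (String.ofList kept, cnt, cnt)

-- ===== PRECONDITION & SPEC =====
-- Pre_ excludes exactly the inputs on which A takes a guard branch and returns an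
-- error string instead of a (str, int, int) tuple.
def Pre_remove_consonants (sentence : String) : Prop :=
  PySem.Str.strIsalnum sentence = true ∨ sentence = ""
instance (sentence : String) : Decidable (Pre_remove_consonants sentence) := by
  unfold Pre_remove_consonants; infer_instance

def pvWitness_remove_consonants : String := "aB3"

def Spec_remove_consonants (sentence : String) (out : String × Int × Int) : Prop :=
  out = remove_consonants_alt sentence
instance (sentence : String) (out : String × Int × Int) : Decidable (Spec_remove_consonants sentence out) := by
  unfold Spec_remove_consonants; infer_instance

-- ===== CLAIM =====
def Claim_equal_remove_consonants : Prop :=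
  ∀ (sentence : String), Dom_remove_consonants sentence → Pre_remove_consonants sentence →
    Spec_remove_consonants sentence (remove_consonants sentence)

-- ===== LEMMAS AND PROOFS =====

theorem pvVowel_eq (c : Char) : pvVowelSet.contains c = pvVowels.contains c := by
  simp [pvVowelSet, pvVowels, PySem.Set.ofList]

-- the loop invariant of B's single pass
theorem pvBLoop_spec (cs kept : List Char) (cnt : Int) :
    pvBLoop cs kept cnt =
      (kept ++ cs.filter (fun c => pvVowels.contains c || PySem.Chars.isdigit c),
       cnt + ((cs.filter (fun c => pvVowels.contains c)).map (fun _ => (1 : Int))).sum) := by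
  induction cs generalizing kept cnt with
  | nil => simp [pvBLoop]
  | cons c rest ih =>
    simp only [pvBLoop, pvVowel_eq]
    by_cases hv : c ∈ pvVowels
    · simp [hv, ih, List.filter_cons]
      omega
    · by_cases hd : PySem.Chars.isdigit c = true
      · simp [hv, hd, ih]
      · simp [hv, hd, ih]

theorem pv_filter_filter (cs : List Char) :
    (cs.filter (fun c => pvVowels.contains c || PySem.Chars.isdigit c)).filter
        (fun c => pvVowels.contains c)
      = cs.filter (fun c => pvVowels.contains c) := by
  rw [List.filter_filter]
  apply List.filter_congr
  intro c _
  by_cases hv : c ∈ pvVowels <;> simp [hv]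

-- ===== VERDICT =====
theorem remove_consonants_spec : Claim_equal_remove_consonants := by
  intro s _ hpre
  unfold Spec_remove_consonants remove_consonants remove_consonants_alt
  have hguard : ¬ (¬ (PySem.Str.strIsalnum s) ∧ s ≠ "") := by
    rintro ⟨h1, h2⟩
    rcases hpre with h | h
    · exact h1 h
    · exact h2 h
  rw [if_neg hguard, if_neg hguard]
  simp only [pvBLoop_spec, List.nil_append, zero_add, pv_filter_filter]
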